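-- pv_equiv track=rewrite | github.com/daniesky/debruijn_denovo_mf | src/motif_discovery.py | count_occurances
-- ===== SOURCE A (Python) =====
-- from collections import Counter, defaultdict
-- from itertools import product
--
-- def expand_iupac(motifs):
--     """Expands a sequence with IUPAC codes into all possible combinations of ACGT."""
--     """Expands a sequence with IUPAC codes into all possible combinations of ACGT."""
--     expanded = []
--
--     # Define mapping from IUPAC codes to possible nucleotides
--     iupac_map = {
--         'A': ['A'],
--         'C': ['C'],
--         'G': ['G'],
--         'T': ['T'],
--         'R': ['A', 'G'],
--         'Y': ['C', 'T'],
--         'S': ['G', 'C'],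
--         'W': ['A', 'T'],
--         'K': ['G', 'T'],
--         'M': ['A', 'C'],
--         'B': ['C', 'G', 'T'],
--         'D': ['A', 'G', 'T'],
--         'H': ['A', 'C', 'T'],
--         'V': ['A', 'C', 'G'],
--         'N': ['A', 'C', 'G', 'T']
--     }
--
--     # Go through each motif
--     for motif, _ in motifs:
--         # Create a list of nucleotide sets for each character in the motif
--         nucleotide_sets = []
--
--         for base in motif:
--             if base in iupac_map:
--                 nucleotide_sets.append(iupac_map[base])  # Add the nucleotide set for IUPAC codes
--             else:
--                 nucleotide_sets.append([base])  # If it's a single base, use it as is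
--
--         # Generate all combinations using product (cartesian product)
--         expanded_motifs = [''.join(comb) for comb in product(*nucleotide_sets)]
--
--         # Add the expanded motifs to the result
--         expanded.extend(expanded_motifs)
--     return expanded
--
-- def count_occurances(sequences, motifs):
--     motif_counts = Counter()  # To hold the counts of original motifs
--
--     # Step 1: Generate the expanded motifs
--     expanded_motifs = {}
--     for motif in motifs:
--         expanded_motifs[motif] = expand_iupac([motif])  # Create expanded motifs for each original motif
--
--     # Step 2: Iterate through the sequences and check for matches
--     for seq in sequences:
--         for motif, expanded in expanded_motifs.items():
--             # For each expanded motif, check if it matches the sequence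
--             for expanded_motif in expanded:
--                 if expanded_motif in seq:  # If the expanded motif is found in the sequence
--                     motif_counts[motif] += 1  # Count it under the original motif
--                     break  # Break after the first match to avoid double counting lines
--
--     return motif_counts
-- ===== SOURCE B (Python) =====
-- def count_occurances(sequences, motifs):
--     """Count, per motif, how many sequences contain an IUPAC match of it, by
--     direct positional class-matching (no cartesian expansion of the motifs);
--     match results are memoised per distinct sequence and motif string."""
--     IUPAC = {
--         'A': 'A', 'C': 'C', 'G': 'G', 'T': 'T',
--         'R': 'AG', 'Y': 'CT', 'S': 'GC', 'W': 'AT', 'K': 'GT', 'M': 'AC',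
--         'B': 'CGT', 'D': 'AGT', 'H': 'ACT', 'V': 'ACG', 'N': 'ACGT',
--     }
--
--     order = list(dict.fromkeys(motifs))
--     classes = {}  # motif string -> list of per-position character classes
--     for m in order:
--         if m[0] not in classes:
--             classes[m[0]] = [IUPAC.get(b, b) for b in m[0]]
--
--     def matches(seq, cls):
--         k = len(cls)
--         for i in range(len(seq) - k + 1):
--             if all(c in g for g, c in zip(cls, seq[i:i + k])):
--                 return True
--         return False
--
--     hits = {}  # distinct sequence -> motifs matching it, in motif order
--     for seq in sequences:
--         if seq not in hits:
--             matched = {s for s, cls in classes.items() if matches(seq, cls)}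
--             hits[seq] = [m for m in order if m[0] in matched]
--
--     counts = {}
--     for seq in sequences:
--         for m in hits[seq]:
--             counts[m] = counts.get(m, 0) + 1
--     return counts
-- ===== Notes on version B (the rewrite author's own statement) =====
-- stated objective: alternative
-- what changed: B drops A's cartesian IUPAC expansion of every motif into all concrete patterns (exponential in the number of degenerate bases) and the per-expanded-pattern substring scans, and instead class-matches each motif directly position-by-position, memoising results per distinct sequence and per distinct motif string.
import Mathlib
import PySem

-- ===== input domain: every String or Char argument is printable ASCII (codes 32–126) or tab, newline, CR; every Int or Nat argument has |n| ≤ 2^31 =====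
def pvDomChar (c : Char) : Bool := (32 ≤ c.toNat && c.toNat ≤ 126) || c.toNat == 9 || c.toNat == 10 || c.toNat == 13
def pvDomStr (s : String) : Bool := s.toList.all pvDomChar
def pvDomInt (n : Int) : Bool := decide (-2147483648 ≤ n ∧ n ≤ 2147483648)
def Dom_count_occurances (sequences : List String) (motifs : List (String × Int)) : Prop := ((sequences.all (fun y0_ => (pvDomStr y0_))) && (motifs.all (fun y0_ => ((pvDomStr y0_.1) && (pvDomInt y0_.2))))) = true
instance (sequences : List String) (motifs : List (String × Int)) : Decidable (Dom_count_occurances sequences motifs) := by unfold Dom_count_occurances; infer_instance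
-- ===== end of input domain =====

-- B replaces A's cartesian IUPAC expansion + per-expanded-pattern substring scans by direct
-- positional class-matching, memoised per distinct sequence / motif string (objective: alternative).

-- ===== PORT A =====
-- the keys of A's iupac_map literal, in order
def pvIupacKeys : List Char := ['A','C','G','T','R','Y','S','W','K','M','B','D','H','V','N']
-- the values of A's iupac_map literal (lookup of a key; only applied to keys)
def pvIupacMap (b : Char) : List Char :=
  if b = 'A' then ['A'] else if b = 'C' then ['C'] else if b = 'G' then ['G'] else if b = 'T' then ['T']
  else if b = 'R' then ['A','G'] else if b = 'Y' then ['C','T'] else if b = 'S' then ['G','C']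
  else if b = 'W' then ['A','T'] else if b = 'K' then ['G','T'] else if b = 'M' then ['A','C']
  else if b = 'B' then ['C','G','T'] else if b = 'D' then ['A','G','T'] else if b = 'H' then ['A','C','T']
  else if b = 'V' then ['A','C','G'] else if b = 'N' then ['A','C','G','T'] else []

-- itertools.product(*nucleotide_sets), each tuple ''.join-ed (kept as List Char)
def pvProduct : List (List Char) → List (List Char)
  | [] => [[]]
  | s :: rest => s.flatMap (fun c => (pvProduct rest).map (fun t => c :: t))

-- expand_iupac: loop over motifs, extend with the cartesian product of the per-base nucleotide sets
def pvExpandIupac (motifs : List (String × Int)) : List (List Char) :=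
  motifs.foldl
    (fun acc m =>
      acc ++ pvProduct (m.1.toList.map
        (fun base => if pvIupacKeys.contains base then pvIupacMap base else [base])))
    []

-- the inner 'for expanded_motif in expanded: if … in seq: …; break' loop: true iff the body ran
def pvFirstIn : List (List Char) → List Char → Bool
  | [], _ => false
  | p :: rest, s => if PySem.Chars.isIn p s then true else pvFirstIn rest s

def count_occurances (sequences : List String) (motifs : List (String × Int)) : List (String × Int × Int) :=
  let expandedMotifs : PySem.Dict (String × Int) (List (List Char)) :=
    motifs.foldl (fun d motif => d.insert motif (pvExpandIupac [motif])) PySem.Dict.empty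
  let motifCounts : PySem.Dict (String × Int) Int :=
    sequences.foldl
      (fun cnt seq =>
        expandedMotifs.items.foldl
          (fun cnt mi => if pvFirstIn mi.2 seq.toList then cnt.modify mi.1 0 (· + 1) else cnt)
          cnt)
      PySem.Dict.empty
  motifCounts.items.map (fun p => (p.1.1, p.1.2, p.2))

-- ===== PORT B =====
-- B's IUPAC dict .get(b, b): value strings as char lists, default the char itself
def pvIupacGet (b : Char) : List Char :=
  if b = 'A' then ['A'] else if b = 'C' then ['C'] else if b = 'G' then ['G'] else if b = 'T' then ['T']
  else if b = 'R' then ['A','G'] else if b = 'Y' then ['C','T'] else if b = 'S' then ['G','C']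
  else if b = 'W' then ['A','T'] else if b = 'K' then ['G','T'] else if b = 'M' then ['A','C']
  else if b = 'B' then ['C','G','T'] else if b = 'D' then ['A','G','T'] else if b = 'H' then ['A','C','T']
  else if b = 'V' then ['A','C','G'] else if b = 'N' then ['A','C','G','T'] else [b]

-- matches(seq, cls): try every start; 'all(c in g for g, c in zip(cls, seq[i:i+k]))';
-- seq[i:i+k] with 0 ≤ i is (drop i.toNat).take k, 'c in g' on a short string is char membership
def pvMatchesC (seq : List Char) (cls : List (List Char)) : Bool :=
  (PySem.List.pyRange 0 ((seq.length : Int) - (cls.length : Int) + 1) 1).any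
    (fun i => ((cls.zip ((seq.drop i.toNat).take cls.length)).all (fun gc => gc.1.contains gc.2)))

def count_occurances_alt (sequences : List String) (motifs : List (String × Int)) : List (String × Int × Int) :=
  let order : List (String × Int) := PySem.List.dedup motifs
  let classes : PySem.Dict String (List (List Char)) :=
    order.foldl
      (fun d m => if d.contains m.1 then d else d.insert m.1 (m.1.toList.map pvIupacGet))
      PySem.Dict.empty
  let hits : PySem.Dict String (List (String × Int)) :=
    sequences.foldl
      (fun h seq =>
        if h.contains seq then h
        else
          let matched : PySem.Set String :=
            PySem.Set.ofList ((classes.items.filter (fun sc => pvMatchesC seq.toList sc.2)).map (·.1))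
          h.insert seq (order.filter (fun m => matched.contains m.1)))
      PySem.Dict.empty
  let counts : PySem.Dict (String × Int) Int :=
    sequences.foldl
      (fun cnt seq =>
        -- hits[seq]: the key was inserted in the previous loop, so the lookup cannot fail
        (hits.getD seq []).foldl (fun cnt m => cnt.insert m (cnt.getD m 0 + 1)) cnt)
      PySem.Dict.empty
  counts.items.map (fun p => (p.1.1, p.1.2, p.2))

-- ===== PRECONDITION & SPEC =====
def Spec_count_occurances (sequences : List String) (motifs : List (String × Int)) (out : List (String × Int × Int)) : Prop := out = count_occurances_alt sequences motifs
instance (sequences : List String) (motifs : List (String × Int)) (out : List (String × Int × Int)) : Decidable (Spec_count_occurances sequences motifs out) := by unfold Spec_count_occurances; infer_instance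

-- ===== CLAIM (what is proved, stated in full; the proofs are below) =====
def Claim_equal_count_occurances : Prop := ∀ (sequences : List String) (motifs : List (String × Int)), Dom_count_occurances sequences motifs → Spec_count_occurances sequences motifs (count_occurances sequences motifs)

-- ===== LEMMAS AND PROOFS =====

-- A's per-base nucleotide set equals B's IUPAC.get(b, b)
theorem pvNucSet_eq (b : Char) :
    (if pvIupacKeys.contains b then pvIupacMap b else [b]) = pvIupacGet b := by
  by_cases h1 : b = 'A'
  · subst h1; decide
  by_cases h2 : b = 'C'
  · subst h2; decide
  by_cases h3 : b = 'G'
  · subst h3; decide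
  by_cases h4 : b = 'T'
  · subst h4; decide
  by_cases h5 : b = 'R'
  · subst h5; decide
  by_cases h6 : b = 'Y'
  · subst h6; decide
  by_cases h7 : b = 'S'
  · subst h7; decide
  by_cases h8 : b = 'W'
  · subst h8; decide
  by_cases h9 : b = 'K'
  · subst h9; decide
  by_cases h10 : b = 'M'
  · subst h10; decide
  by_cases h11 : b = 'B'
  · subst h11; decide
  by_cases h12 : b = 'D'
  · subst h12; decide
  by_cases h13 : b = 'H'
  · subst h13; decide
  by_cases h14 : b = 'V'
  · subst h14; decide
  by_cases h15 : b = 'N'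
  · subst h15; decide
  simp [pvIupacKeys, pvIupacGet, h1, h2, h3, h4, h5, h6, h7, h8, h9, h10, h11, h12, h13, h14, h15]

-- proof-side view of B's matcher, on the unmapped motif characters
def pvMatchHere (pat seq : List Char) : Bool :=
  (pat.zip seq).all (fun bc => (pvIupacGet bc.1).contains bc.2)

def pvMatches (seq pat : List Char) : Bool :=
  (PySem.List.pyRange 0 ((seq.length : Int) - (pat.length : Int) + 1) 1).any
    (fun i => pvMatchHere pat ((seq.drop i.toNat).take pat.length))

theorem pvZip_map_left {α β γ : Type} (f : α → γ) (l : List α) (t : List β) :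
    (l.map f).zip t = (l.zip t).map (fun p => (f p.1, p.2)) := by
  induction l generalizing t with
  | nil => simp
  | cons a l ih =>
    cases t with
    | nil => simp
    | cons b t => simp [ih]

-- B's matcher applied to the mapped classes is the unmapped view
theorem pvMatchesC_eq (seq pat : List Char) :
    pvMatchesC seq (pat.map pvIupacGet) = pvMatches seq pat := by
  unfold pvMatchesC pvMatches pvMatchHere
  simp only [List.length_map, pvZip_map_left, List.all_map]
  rfl

theorem pvFirstIn_eq_any (ps : List (List Char)) (s : List Char) :
    pvFirstIn ps s = ps.any (fun p => PySem.Chars.isIn p s) := by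
  induction ps with
  | nil => rfl
  | cons p ps ih =>
    simp only [pvFirstIn, List.any_cons, ih, Bool.if_true_left, Bool.decide_eq_true]

theorem mem_pvProduct (ls : List (List Char)) (p : List Char) :
    p ∈ pvProduct ls ↔ List.Forall₂ (fun c cl => c ∈ cl) p ls := by
  induction ls generalizing p with
  | nil => simp [pvProduct, List.forall₂_nil_right_iff]
  | cons cl ls ih =>
    simp only [pvProduct, List.mem_flatMap, List.mem_map, List.forall₂_cons_right_iff]
    constructor
    · rintro ⟨c, hc, q, hq, rfl⟩; exact ⟨c, q, hc, (ih q).1 hq, rfl⟩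
    · rintro ⟨c, q, hc, hq, rfl⟩; exact ⟨c, hc, q, (ih q).2 hq, rfl⟩

theorem pvMatchHere_iff (m t : List Char) :
    (pvMatchHere m t = true ∧ m.length ≤ t.length) ↔
      ∃ p, List.Forall₂ (fun c cl => c ∈ cl) p (m.map pvIupacGet) ∧ p <+: t := by
  induction m generalizing t with
  | nil => simp [pvMatchHere]
  | cons b m ih =>
    cases t with
    | nil => simp [pvMatchHere, List.forall₂_cons_right_iff]
    | cons c t =>
      simp only [pvMatchHere, List.zip_cons_cons, List.all_cons, List.map_cons, Bool.and_eq_true,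
        List.length_cons, Nat.add_le_add_iff_right, List.forall₂_cons_right_iff]
      constructor
      · rintro ⟨⟨h1, h2⟩, h3⟩
        obtain ⟨p, hp, hpre⟩ := (ih t).1 ⟨h2, h3⟩
        exact ⟨c :: p, ⟨c, p, by simpa using h1, hp, rfl⟩, by simpa using hpre⟩
      · rintro ⟨p, ⟨c', q, hc, hq, rfl⟩, hpre⟩
        rcases List.cons_prefix_cons.mp hpre with ⟨rfl, hq'⟩
        obtain ⟨hh, hl⟩ := (ih t).2 ⟨q, hq, hq'⟩
        exact ⟨⟨by simpa using hc, hh⟩, hl⟩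

theorem pvZip_take (pat t : List Char) : pat.zip (t.take pat.length) = pat.zip t := by
  induction pat generalizing t with
  | nil => simp
  | cons a pat ih =>
    cases t with
    | nil => simp
    | cons b t => simp [ih]

theorem pvMatchHere_take (pat t : List Char) :
    pvMatchHere pat (t.take pat.length) = pvMatchHere pat t := by
  unfold pvMatchHere
  rw [pvZip_take]

theorem pvMatches_iff (s m : List Char) :
    pvMatches s m = true ↔ ∃ j, pvMatchHere m (s.drop j) = true ∧ m.length ≤ (s.drop j).length := by
  simp only [pvMatches, pvMatchHere_take, List.any_eq_true, PySem.List.mem_pyRange_one]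
  constructor
  · rintro ⟨i, ⟨h0, hlt⟩, hm⟩
    refine ⟨i.toNat, hm, ?_⟩
    rw [List.length_drop]; omega
  · rintro ⟨j, hm, hl⟩
    rw [List.length_drop] at hl
    by_cases hj : j ≤ s.length
    · exact ⟨(j : Int), ⟨by positivity, by omega⟩, by simpa using hm⟩
    · have hm0 : m = [] := List.length_eq_zero_iff.mp (by omega)
      subst hm0
      exact ⟨0, ⟨le_refl 0, by omega⟩, by simp [pvMatchHere]⟩

theorem infix_iff_exists_drop (p s : List Char) : p <:+: s ↔ ∃ j, p <+: s.drop j := by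
  constructor
  · rintro h
    obtain ⟨t, hpt, hts⟩ := List.infix_iff_prefix_suffix.mp h
    exact ⟨s.length - t.length, List.suffix_iff_eq_drop.mp hts ▸ hpt⟩
  · rintro ⟨j, hj⟩
    exact List.infix_iff_prefix_suffix.mpr ⟨s.drop j, hj, List.drop_suffix _ _⟩

-- the key pointwise fact: A's expanded-pattern scan = B's direct class match
theorem pvFirstIn_expand (seq : String) (m : String × Int) :
    pvFirstIn (pvExpandIupac [m]) seq.toList = pvMatches seq.toList m.1.toList := by
  have hexp : pvExpandIupac [m] = pvProduct (m.1.toList.map pvIupacGet) := by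
    show [] ++ _ = _
    rw [List.nil_append]
    congr 1
    apply List.map_congr_left
    intro b _
    exact pvNucSet_eq b
  rw [hexp, pvFirstIn_eq_any, Bool.eq_iff_iff, List.any_eq_true]
  constructor
  · rintro ⟨p, hp, hin⟩
    obtain ⟨j, hpre⟩ := (infix_iff_exists_drop p seq.toList).mp
      ((PySem.Chars.isIn_iff_infix p seq.toList).mp hin)
    obtain ⟨hh, hl⟩ := (pvMatchHere_iff m.1.toList (seq.toList.drop j)).2
      ⟨p, (mem_pvProduct _ p).1 hp, hpre⟩
    exact (pvMatches_iff seq.toList m.1.toList).2 ⟨j, hh, hl⟩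
  · intro h
    obtain ⟨j, hh, hl⟩ := (pvMatches_iff seq.toList m.1.toList).1 h
    obtain ⟨p, hp, hpre⟩ := (pvMatchHere_iff m.1.toList (seq.toList.drop j)).1 ⟨hh, hl⟩
    exact ⟨p, (mem_pvProduct _ p).2 hp,
      (PySem.Chars.isIn_iff_infix p seq.toList).mpr
        ((infix_iff_exists_drop p seq.toList).mpr ⟨j, hpre⟩)⟩

-- a foldl of key-determined inserts, from a key-determined dict: items = deduped keys, paired
theorem pvItems_foldl (f : (String × Int) → List (List Char))
    (ms : List (String × Int)) (s : List (String × Int)) :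
    (ms.foldl (fun d m => d.insert m (f m)) (PySem.Dict.mk (s.map (fun m => (m, f m))))).items
      = (PySem.Set.update s ms).map (fun m => (m, f m)) := by
  induction ms generalizing s with
  | nil => simp [PySem.Set.update]
  | cons m ms ih =>
    have hkeys : (PySem.Dict.mk (s.map (fun m => (m, f m)))).keys = s := by
      simp [PySem.Dict.keys, List.map_map, Function.comp_def]
    have hcont : (PySem.Dict.mk (s.map (fun m => (m, f m)))).contains m = decide (m ∈ s) := by
      rw [PySem.Dict.contains_eq_decide_mem_keys, hkeys]
    by_cases hm : m ∈ s
    · have hins : (PySem.Dict.mk (s.map (fun m => (m, f m)))).insert m (f m)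
          = PySem.Dict.mk (s.map (fun m => (m, f m))) := by
        apply PySem.Dict.ext
        rw [PySem.Dict.items_insert_of_contains _ _ (by simp [hcont, hm])]
        show (s.map _).map _ = _
        rw [List.map_map]
        apply List.map_congr_left
        intro x hx
        by_cases hxm : x = m
        · subst hxm; simp
        · simp [hxm]
      rw [List.foldl_cons, hins, ih, PySem.Set.update_cons]
      have hadd : PySem.Set.add s m = s := by simp [PySem.Set.add, hm]
      rw [hadd]
    · have hins : (PySem.Dict.mk (s.map (fun m => (m, f m)))).insert m (f m)
          = PySem.Dict.mk ((s ++ [m]).map (fun m => (m, f m))) := by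
        apply PySem.Dict.ext
        rw [PySem.Dict.items_insert_of_not_contains _ _ (by simp [hcont, hm])]
        simp
      rw [List.foldl_cons, hins, ih, PySem.Set.update_cons]
      have hadd : PySem.Set.add s m = s ++ [m] := by simp [PySem.Set.add, hm]
      rw [hadd]

-- A's motif→expansion dict, as items, is the deduped motif list paired with the expansions
theorem pvItems_expandDict (motifs : List (String × Int)) :
    (motifs.foldl (fun d motif => d.insert motif (pvExpandIupac [motif])) PySem.Dict.empty).items
      = (PySem.List.dedup motifs).map (fun m => (m, pvExpandIupac [m])) := by
  have h0 : (PySem.Dict.empty : PySem.Dict (String × Int) (List (List Char)))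
      = PySem.Dict.mk (([] : List (String × Int)).map (fun m => (m, pvExpandIupac [m]))) := rfl
  rw [h0, pvItems_foldl, PySem.Set.update_nil_left, PySem.List.dedup_eq_ofList]

-- B's classes dict: guarded key-determined inserts over the motif list = deduped strings, paired
theorem pvItems_classes (g : String → List (List Char))
    (ms : List (String × Int)) (s : List String) :
    (ms.foldl (fun d m => if d.contains m.1 then d else d.insert m.1 (g m.1))
        (PySem.Dict.mk (s.map (fun x => (x, g x))))).items
      = (PySem.Set.update s (ms.map (·.1))).map (fun x => (x, g x)) := by
  induction ms generalizing s with
  | nil => simp [PySem.Set.update]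
  | cons m ms ih =>
    have hkeys : (PySem.Dict.mk (s.map (fun x => (x, g x)))).keys = s := by
      simp [PySem.Dict.keys, List.map_map, Function.comp_def]
    have hcont : (PySem.Dict.mk (s.map (fun x => (x, g x)))).contains m.1 = decide (m.1 ∈ s) := by
      rw [PySem.Dict.contains_eq_decide_mem_keys, hkeys]
    by_cases hm : m.1 ∈ s
    · rw [List.foldl_cons, if_pos (by simp [hcont, hm]), ih, List.map_cons,
        PySem.Set.update_cons]
      have hadd : PySem.Set.add s m.1 = s := by simp [PySem.Set.add, hm]
      rw [hadd]
    · rw [List.foldl_cons, if_neg (by simp [hcont, hm])]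
      have hins : (PySem.Dict.mk (s.map (fun x => (x, g x)))).insert m.1 (g m.1)
          = PySem.Dict.mk ((s ++ [m.1]).map (fun x => (x, g x))) := by
        apply PySem.Dict.ext
        rw [PySem.Dict.items_insert_of_not_contains _ _ (by simp [hcont, hm])]
        simp
      rw [hins, ih, List.map_cons, PySem.Set.update_cons]
      have hadd : PySem.Set.add s m.1 = s ++ [m.1] := by simp [PySem.Set.add, hm]
      rw [hadd]

-- the per-sequence hit list B stores: filtering the deduped motifs by the direct match
theorem pvHitValue_eq (order : List (String × Int)) (seq : String) :
    (order.filter (fun m =>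
      PySem.Set.contains
        (PySem.Set.ofList
          (((order.foldl
              (fun d m => if d.contains m.1 then d else d.insert m.1 (m.1.toList.map pvIupacGet))
              PySem.Dict.empty).items.filter
                (fun sc => pvMatchesC seq.toList sc.2)).map (·.1)))
        m.1))
      = order.filter (fun m => pvMatches seq.toList m.1.toList) := by
  have hitems : (order.foldl
      (fun d m => if d.contains m.1 then d else d.insert m.1 (m.1.toList.map pvIupacGet))
      PySem.Dict.empty).items
      = (PySem.Set.ofList (order.map (·.1))).map (fun x => (x, x.toList.map pvIupacGet)) := by
    have h0 : (PySem.Dict.empty : PySem.Dict String (List (List Char)))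
        = PySem.Dict.mk (([] : List String).map (fun x => (x, x.toList.map pvIupacGet))) := rfl
    rw [h0, pvItems_classes (fun x => x.toList.map pvIupacGet) order ([] : List String),
      PySem.Set.update_nil_left]
  rw [hitems, List.filter_map, List.map_map]
  apply List.filter_congr
  intro m hm
  have hmem : m.1 ∈ PySem.Set.ofList (order.map (·.1)) := by
    rw [PySem.Set.mem_ofList]
    exact List.mem_map_of_mem hm
  rw [Bool.eq_iff_iff, PySem.Set.contains_iff, PySem.Set.mem_ofList]
  simp only [Function.comp_def, List.mem_map, List.mem_filter]
  constructor
  · rintro ⟨x, ⟨hx0, hmatch⟩, hx1⟩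
    have hxeq : x = m.1 := hx1
    subst hxeq
    rwa [pvMatchesC_eq] at hmatch
  · intro h
    exact ⟨m.1, ⟨hmem, by rw [pvMatchesC_eq]; exact h⟩, rfl⟩

-- containment is monotone along the memo fold
theorem pvContains_mono (g : String → List (String × Int)) (seqs : List String)
    (h : PySem.Dict String (List (String × Int))) (s : String)
    (hs : h.contains s = true) :
    (seqs.foldl (fun h seq => if h.contains seq then h else h.insert seq (g seq)) h).contains s = true := by
  induction seqs generalizing h with
  | nil => simpa using hs
  | cons r seqs ihr =>
    rw [List.foldl_cons]
    by_cases hr : h.contains r = true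
    · rw [if_pos hr]; exact ihr h hs
    · rw [if_neg hr]
      exact ihr _ (by simp [PySem.Dict.contains_insert, hs])

-- the memo loop: every processed sequence is a key, and every stored value is g of its key
theorem pvMemo_spec (g : String → List (String × Int)) (seqs : List String)
    (h : PySem.Dict String (List (String × Int)))
    (hgood : ∀ s, h.contains s = true → h.getD s [] = g s) :
    (∀ s, (seqs.foldl (fun h seq => if h.contains seq then h else h.insert seq (g seq)) h).contains s = true →
        (seqs.foldl (fun h seq => if h.contains seq then h else h.insert seq (g seq)) h).getD s [] = g s)
    ∧ (∀ s ∈ seqs, (seqs.foldl (fun h seq => if h.contains seq then h else h.insert seq (g seq)) h).contains s = true) := by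
  induction seqs generalizing h with
  | nil => exact ⟨hgood, by simp⟩
  | cons q seqs ih =>
    rw [List.foldl_cons]
    by_cases hq : h.contains q = true
    · rw [if_pos hq]
      obtain ⟨g1, g2⟩ := ih h hgood
      refine ⟨g1, ?_⟩
      intro s hs
      rcases List.mem_cons.mp hs with rfl | hs
      · exact pvContains_mono g seqs h s hq
      · exact g2 s hs
    · rw [if_neg hq]
      have hgood' : ∀ s, (h.insert q (g q)).contains s = true → (h.insert q (g q)).getD s [] = g s := by
        intro s hs
        by_cases hsq : s = q
        · subst hsq
          rw [PySem.Dict.getD_insert_self]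
        · rw [PySem.Dict.getD_insert_of_ne _ _ _ hsq]
          rw [PySem.Dict.contains_insert] at hs
          simp [hsq] at hs
          exact hgood s hs
      obtain ⟨g1, g2⟩ := ih _ hgood'
      refine ⟨g1, ?_⟩
      intro s hs
      rcases List.mem_cons.mp hs with rfl | hs
      · exact pvContains_mono g seqs _ s (by simp)
      · exact g2 s hs

-- Counter's 'counts[k] += 1' is dict's 'counts[k] = counts.get(k, 0) + 1'
theorem pvModify_eq_insert (d : PySem.Dict (String × Int) Int) (k : String × Int) :
    d.modify k 0 (· + 1) = d.insert k (d.getD k 0 + 1) := rfl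

-- folding over a filtered list = folding with the filter as a guard
theorem pvFoldl_filter {α β : Type} (p : α → Bool) (f : β → α → β) (l : List α) (b : β) :
    (l.filter p).foldl f b = l.foldl (fun b a => if p a then f b a else b) b := by
  induction l generalizing b with
  | nil => rfl
  | cons a l ih =>
    by_cases h : p a = true
    · simp [h, ih]
    · simp only [List.filter_cons, h]
      simp only [Bool.false_eq_true, if_false, List.foldl_cons, ih]
      rw [if_neg (by simp [h])]

-- ===== VERDICT (by name: the statement is the Claim_ definition above) =====
theorem count_occurances_spec : Claim_equal_count_occurances := by
  intro sequences motifs _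
  unfold Spec_count_occurances
  simp only [count_occurances, count_occurances_alt, pvItems_expandDict, List.foldl_map,
    pvFirstIn_expand, pvModify_eq_insert, pvHitValue_eq]
  congr 1
  apply congrArg PySem.Dict.items
  obtain ⟨hg, hall⟩ := pvMemo_spec
    (fun seq => (PySem.List.dedup motifs).filter (fun m => pvMatches seq.toList m.1.toList))
    sequences PySem.Dict.empty (by intro s hs; simp at hs)
  apply PySem.List.foldl_congr_mem
  intro cnt seq hseq
  rw [hg seq (hall seq hseq), pvFoldl_filter]
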